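-- pv_equiv track=rewrite | github.com/ivababukova-zz/data-structures | ctci-chapter8/stack_of_boxes.py | create_stack
-- ===== SOURCE A (Python) =====
-- def fits(box1, box2):
--     for i in range(3):
--         if box1[i] <= box2[i]:
--             return False
--     return True
--
-- def create_stack(boxes, bottomi, stack_map):
--     if bottomi in stack_map:
--         return stack_map[bottomi]
--     bottom = boxes[bottomi]
--     max_height = 0
--     for i in range(bottomi + 1, len(boxes)):
--         if fits(bottom, boxes[i]):
--             height = create_stack(boxes, i, stack_map)
--             max_height = max(max_height, height)
--     max_height += bottom[1]
--     stack_map[bottomi] = max_height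
--     return max_height
-- ===== SOURCE B (Python) =====
-- def fits(box1, box2):
--     return all(a > b for a, b in zip(box1, box2))
--
-- def create_stack(boxes, bottomi, stack_map):
--     # Bottom-up right-to-left DP instead of memoized recursion (no mutation of stack_map).
--     if bottomi in stack_map:
--         return stack_map[bottomi]
--     n = len(boxes)
--     h = dict(stack_map)
--     for i in range(n - 1, bottomi - 1, -1):
--         if i not in h:
--             best = 0
--             for j in range(i + 1, n):
--                 if fits(boxes[i], boxes[j]) and h[j] > best:
--                     best = h[j]
--             h[i] = boxes[i][1] + best
--     return h[bottomi]
-- ===== Notes on version B (the rewrite author's own statement) =====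
-- stated objective: alternative
-- what changed: Replaces A's memoized top-down recursion (which mutates stack_map) with an iterative right-to-left bottom-up DP over indices n-1..bottomi, filling a fresh height table; no recursion and no mutation of the argument.
-- outside the precondition, e.g. on create_stack([(3, 3, 3), (1, 1, 1)], 5, {}): A raises IndexError, B raises KeyError
import Mathlib
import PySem

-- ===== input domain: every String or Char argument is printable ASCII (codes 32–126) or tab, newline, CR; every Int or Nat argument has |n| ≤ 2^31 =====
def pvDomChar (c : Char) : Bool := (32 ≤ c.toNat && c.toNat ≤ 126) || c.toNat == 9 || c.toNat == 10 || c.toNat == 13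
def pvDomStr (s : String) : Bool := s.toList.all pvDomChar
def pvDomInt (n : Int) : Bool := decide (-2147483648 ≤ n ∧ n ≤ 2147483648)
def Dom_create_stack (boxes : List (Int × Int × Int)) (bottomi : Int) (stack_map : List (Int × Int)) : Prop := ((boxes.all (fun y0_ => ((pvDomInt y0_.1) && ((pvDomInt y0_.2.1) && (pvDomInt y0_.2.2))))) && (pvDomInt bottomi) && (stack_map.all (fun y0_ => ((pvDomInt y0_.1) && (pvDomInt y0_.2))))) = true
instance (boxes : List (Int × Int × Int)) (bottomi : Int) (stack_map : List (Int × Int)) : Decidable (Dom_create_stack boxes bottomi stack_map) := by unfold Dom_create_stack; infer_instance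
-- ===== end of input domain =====

-- B replaces A's memoized recursion by a right-to-left bottom-up DP loop (no recursion); equivalence is
-- about the RETURN value only: Python A mutates stack_map in place, B does not.

-- ===== PORT A =====
-- fits: the range(3) loop with early 'return False', unrolled over the three components
def fitsA (b1 b2 : Int × Int × Int) : Bool :=
  if b1.1 ≤ b2.1 then false
  else if b1.2.1 ≤ b2.2.1 then false
  else if b1.2.2 ≤ b2.2.2 then false
  else true

-- A's recursion, threading the mutated dict; fuel only makes it total (a call chain strictly
-- increases the index inside [-len, len), so 2*len+1 fuel is never exhausted on Pre_ inputs)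
def createA (boxes : List (Int × Int × Int)) : Nat → Int → PySem.Dict Int Int → Int × PySem.Dict Int Int
  | 0, _, m => (0, m)
  | fuel+1, bottomi, m =>
    match m.get? bottomi with
    | some v => (v, m)
    | none =>
      let bottom := (PySem.List.pyGet? boxes bottomi).getD (0, 0, 0)   -- boxes[bottomi]; none = IndexError, excluded by Pre_
      let r := (PySem.List.pyRange (bottomi + 1) boxes.length 1).foldl
        (fun (st : Int × PySem.Dict Int Int) i =>
          if fitsA bottom ((PySem.List.pyGet? boxes i).getD (0, 0, 0)) then
            let p := createA boxes fuel i st.2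
            (max st.1 p.1, p.2)
          else st) (0, m)
      (r.1 + bottom.2.1, r.2.insert bottomi (r.1 + bottom.2.1))

def create_stack (boxes : List (Int × Int × Int)) (bottomi : Int) (stack_map : List (Int × Int)) : Int :=
  (createA boxes (2 * boxes.length + 1) bottomi (PySem.Dict.ofList stack_map)).1

-- ===== PORT B =====
-- fits: all(a > b for a, b in zip(box1, box2))
def fitsB (b1 b2 : Int × Int × Int) : Bool :=
  (([b1.1, b1.2.1, b1.2.2]).zip [b2.1, b2.2.1, b2.2.2]).all (fun p => p.1 > p.2)

-- inner loop: best over j in range(i+1, n) of h[j] where fits(boxes[i], boxes[j]) and h[j] > best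
def bestB (boxes : List (Int × Int × Int)) (h : PySem.Dict Int Int) (i : Int) : Int :=
  (PySem.List.pyRange (i + 1) boxes.length 1).foldl
    (fun best j =>
      if fitsB ((PySem.List.pyGet? boxes i).getD (0, 0, 0)) ((PySem.List.pyGet? boxes j).getD (0, 0, 0))
          && (h.get? j).getD 0 > best   -- h[j]; present under Pre_
      then (h.get? j).getD 0 else best) 0

-- one step of the outer loop body: if i not in h: h[i] = boxes[i][1] + best
def stepB (boxes : List (Int × Int × Int)) (h : PySem.Dict Int Int) (i : Int) : PySem.Dict Int Int :=
  if h.contains i then h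
  else h.insert i (((PySem.List.pyGet? boxes i).getD (0, 0, 0)).2.1 + bestB boxes h i)

def create_stack_alt (boxes : List (Int × Int × Int)) (bottomi : Int) (stack_map : List (Int × Int)) : Int :=
  let m := PySem.Dict.ofList stack_map
  match m.get? bottomi with
  | some v => v
  | none =>
    let h := (PySem.List.pyRange ((boxes.length : Int) - 1) (bottomi - 1) (-1)).foldl (stepB boxes) m
    (h.get? bottomi).getD 0   -- h[bottomi]; present under Pre_

-- ===== PRECONDITION & SPEC =====
-- Pre_ excludes exactly the inputs where Python raises: bottomi not a key of stack_map and
-- outside Python's index range [-len(boxes), len(boxes)) (IndexError in A, KeyError in B).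
def Pre_create_stack (boxes : List (Int × Int × Int)) (bottomi : Int) (stack_map : List (Int × Int)) : Prop :=
  (PySem.Dict.ofList stack_map).contains bottomi = true ∨
    (-(boxes.length : Int) ≤ bottomi ∧ bottomi < boxes.length)
instance (boxes : List (Int × Int × Int)) (bottomi : Int) (stack_map : List (Int × Int)) : Decidable (Pre_create_stack boxes bottomi stack_map) := by unfold Pre_create_stack; infer_instance

def pvWitness_create_stack : (List (Int × Int × Int)) × Int × (List (Int × Int)) :=
  ([(3, 3, 3), (1, 1, 1)], 0, [])

def Spec_create_stack (boxes : List (Int × Int × Int)) (bottomi : Int) (stack_map : List (Int × Int)) (out : Int) : Prop := out = create_stack_alt boxes bottomi stack_map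
instance (boxes : List (Int × Int × Int)) (bottomi : Int) (stack_map : List (Int × Int)) (out : Int) : Decidable (Spec_create_stack boxes bottomi stack_map out) := by unfold Spec_create_stack; infer_instance

-- ===== CLAIM (what is proved, stated in full; the proofs are below) =====
def Claim_equal_create_stack : Prop := ∀ (boxes : List (Int × Int × Int)) (bottomi : Int) (stack_map : List (Int × Int)), Dom_create_stack boxes bottomi stack_map → Pre_create_stack boxes bottomi stack_map → Spec_create_stack boxes bottomi stack_map (create_stack boxes bottomi stack_map)

-- ===== LEMMAS AND PROOFS =====

theorem fits_eq (b1 b2 : Int × Int × Int) : fitsB b1 b2 = fitsA b1 b2 := by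
  simp only [fitsA, fitsB, List.zip, List.zipWith, List.all_cons, List.all_nil]
  split_ifs <;> simp_all

-- the reference value: what the memoized recursion computes for index i (fuel-indexed)
def specV (boxes : List (Int × Int × Int)) (m0 : PySem.Dict Int Int) : Nat → Int → Int
  | 0, _ => 0
  | fuel+1, i =>
    match m0.get? i with
    | some v => v
    | none =>
      let b := (PySem.List.pyGet? boxes i).getD (0, 0, 0)
      (PySem.List.pyRange (i + 1) boxes.length 1).foldl
        (fun acc j =>
          if fitsA b ((PySem.List.pyGet? boxes j).getD (0, 0, 0)) then
            max acc (specV boxes m0 fuel j)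
          else acc) 0
      + b.2.1

theorem specV_stable (boxes : List (Int × Int × Int)) (m0 : PySem.Dict Int Int) :
    ∀ (f1 f2 : Nat) (i : Int), ((boxes.length : Int) - i).toNat < f1 →
      ((boxes.length : Int) - i).toNat < f2 →
      specV boxes m0 f1 i = specV boxes m0 f2 i := by
  intro f1
  induction f1 with
  | zero => intro f2 i h1 _; omega
  | succ a ih =>
    intro f2 i h1 h2
    cases f2 with
    | zero => omega
    | succ b =>
      simp only [specV]
      cases hm : m0.get? i with
      | some v => rfl
      | none =>
        simp only []
        congr 1
        apply PySem.List.foldl_congr_mem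
        intro acc j hj
        rw [PySem.List.mem_pyRange_one] at hj
        split
        · rw [ih b j (by omega) (by omega)]
        · rfl

def GoodA (boxes : List (Int × Int × Int)) (m0 m : PySem.Dict Int Int) : Prop :=
  (∀ k v, m0.get? k = some v → m.get? k = some v) ∧
  (∀ k v, m.get? k = some v → v = specV boxes m0 (((boxes.length : Int) - k).toNat + 1) k)

theorem createA_spec (boxes : List (Int × Int × Int)) (m0 : PySem.Dict Int Int) :
    ∀ (fuel : Nat) (i : Int) (m : PySem.Dict Int Int),
      ((boxes.length : Int) - i).toNat < fuel → GoodA boxes m0 m →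
      (createA boxes fuel i m).1 = specV boxes m0 (((boxes.length : Int) - i).toNat + 1) i ∧
        GoodA boxes m0 (createA boxes fuel i m).2 := by
  intro fuel
  induction fuel with
  | zero => intro i m h _; omega
  | succ a ih =>
    intro i m hfuel hg
    simp only [createA]
    cases hm : m.get? i with
    | some v =>
      refine ⟨?_, hg⟩
      simpa using hg.2 i v hm
    | none =>
      have hm0 : m0.get? i = none := by
        cases hm0 : m0.get? i with
        | none => rfl
        | some w => exact absurd (hg.1 i w hm0) (by simp [hm])
      set bottom := (PySem.List.pyGet? boxes i).getD (0, 0, 0) with hbdef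
      -- loop invariant over the (threaded-state) fold
      have loop : ∀ (js : List Int), (∀ j ∈ js, ((boxes.length : Int) - j).toNat < a) →
          ∀ (acc : Int) (m' : PySem.Dict Int Int), GoodA boxes m0 m' →
          (js.foldl (fun (st : Int × PySem.Dict Int Int) j =>
              if fitsA bottom ((PySem.List.pyGet? boxes j).getD (0, 0, 0)) then
                let p := createA boxes a j st.2
                (max st.1 p.1, p.2)
              else st) (acc, m')).1
            = js.foldl (fun acc j =>
                if fitsA bottom ((PySem.List.pyGet? boxes j).getD (0, 0, 0)) then
                  max acc (specV boxes m0 (((boxes.length : Int) - j).toNat + 1) j)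
                else acc) acc ∧
          GoodA boxes m0 ((js.foldl (fun (st : Int × PySem.Dict Int Int) j =>
              if fitsA bottom ((PySem.List.pyGet? boxes j).getD (0, 0, 0)) then
                let p := createA boxes a j st.2
                (max st.1 p.1, p.2)
              else st) (acc, m')).2) := by
        intro js
        induction js with
        | nil => intro _ acc m' hg'; exact ⟨rfl, hg'⟩
        | cons j rest ihr =>
          intro hb acc m' hg'
          simp only [List.foldl_cons]
          by_cases hf : fitsA bottom ((PySem.List.pyGet? boxes j).getD (0, 0, 0)) = true
          · simp only [hf, if_pos]
            obtain ⟨hv, hg''⟩ := ih j m' (hb j (by simp)) hg'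
            rw [hv]
            exact ihr (fun x hx => hb x (by simp [hx])) _ _ hg''
          · rw [if_neg hf, if_neg hf]
            exact ihr (fun x hx => hb x (by simp [hx])) acc m' hg'
      have hbound : ∀ j ∈ PySem.List.pyRange (i + 1) (boxes.length : Int) 1,
          ((boxes.length : Int) - j).toNat < a := by
        intro j hj
        rw [PySem.List.mem_pyRange_one] at hj
        omega
      obtain ⟨hv, hg'⟩ := loop _ hbound 0 m hg
      -- the computed value is specV at i
      have hvi : (PySem.List.pyRange (i + 1) (boxes.length : Int) 1).foldl
            (fun acc j =>
              if fitsA bottom ((PySem.List.pyGet? boxes j).getD (0, 0, 0)) then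
                max acc (specV boxes m0 (((boxes.length : Int) - j).toNat + 1) j)
              else acc) 0 + bottom.2.1
          = specV boxes m0 (((boxes.length : Int) - i).toNat + 1) i := by
        conv_rhs => rw [specV]
        rw [hm0]
        simp only []
        congr 1
        apply PySem.List.foldl_congr_mem
        intro acc j hj
        rw [PySem.List.mem_pyRange_one] at hj
        split
        · rw [specV_stable boxes m0 (((boxes.length : Int) - i).toNat) (((boxes.length : Int) - j).toNat + 1) j (by omega) (by omega)]
        · rfl
      refine ⟨by simp only []; rw [hv]; exact hvi, ?_⟩
      simp only []
      constructor
      · intro k v hk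
        have hne : k ≠ i := by intro h; rw [h, hm0] at hk; simp at hk
        rw [PySem.Dict.get?_insert, if_neg hne]
        exact hg'.1 k v hk
      · intro k v hk
        by_cases hki : k = i
        · subst hki
          rw [PySem.Dict.get?_insert_self] at hk
          rw [hv, hvi] at hk
          exact (Option.some.inj hk).symm
        · rw [PySem.Dict.get?_insert, if_neg hki] at hk
          exact hg'.2 k v hk

-- B's loop invariant: after processing indices [i0, len), h holds specV there and m0 elsewhere
def InvB (boxes : List (Int × Int × Int)) (m0 : PySem.Dict Int Int) (i0 : Int) (h : PySem.Dict Int Int) : Prop :=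
  ∀ k, h.get? k = if i0 ≤ k ∧ k < (boxes.length : Int)
      then some (specV boxes m0 (((boxes.length : Int) - k).toNat + 1) k)
      else m0.get? k

theorem stepB_spec (boxes : List (Int × Int × Int)) (m0 : PySem.Dict Int Int)
    (i : Int) (h : PySem.Dict Int Int) (hi : i < (boxes.length : Int))
    (hinv : InvB boxes m0 (i + 1) h) : InvB boxes m0 i (stepB boxes h i) := by
  have hgi : h.get? i = m0.get? i := by
    have := hinv i
    rw [if_neg (by omega)] at this
    exact this
  unfold stepB
  rw [PySem.Dict.contains_eq_isSome_get?, hgi]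
  cases hm0 : m0.get? i with
  | some v =>
    simp only [Option.isSome_some, if_true]
    intro k
    by_cases hk : k = i
    · subst hk
      rw [hgi, hm0, if_pos (by omega)]
      congr 1
      rw [specV]
      simp [hm0]
    · have := hinv k
      rw [this]
      by_cases hc : i ≤ k ∧ k < (boxes.length : Int)
      · rw [if_pos hc, if_pos (by omega)]
      · rw [if_neg hc, if_neg (by intro hc2; exact hc ⟨by omega, hc2.2⟩)]
  | none =>
    simp only [Option.isSome_none, Bool.false_eq_true, if_false]
    -- the computed value equals specV at i
    have hval : ((PySem.List.pyGet? boxes i).getD (0, 0, 0)).2.1 + bestB boxes h i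
        = specV boxes m0 (((boxes.length : Int) - i).toNat + 1) i := by
      rw [specV, hm0]
      simp only []
      rw [Int.add_comm]
      congr 1
      unfold bestB
      apply PySem.List.foldl_congr_mem
      intro acc j hj
      rw [PySem.List.mem_pyRange_one] at hj
      have hhj : h.get? j = some (specV boxes m0 (((boxes.length : Int) - j).toNat + 1) j) := by
        have := hinv j
        rwa [if_pos (by omega)] at this
      rw [hhj, fits_eq]
      simp only [Option.getD_some]
      rw [specV_stable boxes m0 (((boxes.length : Int) - i).toNat) (((boxes.length : Int) - j).toNat + 1) j (by omega) (by omega)]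
      split
      · rename_i hcond
        rw [Bool.and_eq_true] at hcond
        rw [if_pos hcond.1]
        have := of_decide_eq_true hcond.2
        omega
      · rename_i hcond
        rw [Bool.and_eq_true, not_and_or] at hcond
        rcases hcond with hc | hc
        · rw [if_neg (by simpa using hc)]
        · split
          · have := of_decide_eq_false (Bool.of_not_eq_true hc)
            omega
          · rfl
    intro k
    by_cases hk : k = i
    · subst hk
      rw [PySem.Dict.get?_insert_self, if_pos (by omega), hval]
    · rw [PySem.Dict.get?_insert, if_neg hk]
      have := hinv k
      rw [this]
      by_cases hc : i ≤ k ∧ k < (boxes.length : Int)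
      · rw [if_pos hc, if_pos (by omega)]
      · rw [if_neg hc, if_neg (by intro hc2; exact hc ⟨by omega, hc2.2⟩)]

theorem loopB_spec (boxes : List (Int × Int × Int)) (m0 : PySem.Dict Int Int) (bottomi : Int) :
    ∀ (k : Nat) (i0 : Int) (h : PySem.Dict Int Int), i0 - bottomi = (k : Int) →
      i0 ≤ (boxes.length : Int) → InvB boxes m0 i0 h →
      InvB boxes m0 bottomi ((PySem.List.pyRange (i0 - 1) (bottomi - 1) (-1)).foldl (stepB boxes) h) := by
  intro k
  induction k with
  | zero =>
    intro i0 h hk _ hinv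
    rw [PySem.List.pyRange_neg_one_eq_nil (by omega)]
    have : i0 = bottomi := by omega
    subst this
    exact hinv
  | succ a ih =>
    intro i0 h hk hle hinv
    rw [PySem.List.pyRange_neg_one_cons (by omega)]
    rw [List.foldl_cons]
    have hstep := stepB_spec boxes m0 (i0 - 1) h (by omega) (by simpa using hinv)
    have := ih (i0 - 1) (stepB boxes h (i0 - 1)) (by omega) (by omega) hstep
    simpa using this

-- ===== VERDICT (by name: the statement is the Claim_ definition above) =====
theorem create_stack_spec : Claim_equal_create_stack := by
  intro boxes bottomi stack_map _ hpre
  unfold Spec_create_stack create_stack create_stack_alt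
  set m0 := PySem.Dict.ofList stack_map with hm0def
  cases hm : m0.get? bottomi with
  | some v =>
    simp only [hm]
    have : createA boxes (2 * boxes.length + 1) bottomi m0 = (v, m0) := by
      simp only [createA, hm]
    rw [this]
  | none =>
    have hrange : -(boxes.length : Int) ≤ bottomi ∧ bottomi < boxes.length := by
      rcases hpre with hc | hr
      · rw [PySem.Dict.contains_eq_isSome_get?, ← hm0def, hm] at hc
        simp at hc
      · exact hr
    have hgood : GoodA boxes m0 m0 := by
      constructor
      · intro k v hk; exact hk
      · intro k v hk
        rw [specV, hk]
    have hA := createA_spec boxes m0 (2 * boxes.length + 1) bottomi m0 (by omega) hgood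
    rw [hA.1]
    have hinv0 : InvB boxes m0 (boxes.length : Int) m0 := by
      intro k
      rw [if_neg (by omega)]
    have hB := loopB_spec boxes m0 bottomi ((boxes.length : Int) - bottomi).toNat
      (boxes.length : Int) m0 (by omega) (by omega) hinv0
    simp only [hm]
    have := hB bottomi
    rw [if_pos (by omega)] at this
    rw [this]
    rfl
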